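-- pv_equiv track=rewrite | github.com/g-dolphin/WorldCarbonPricingDatabase | _code/_aux_scripts/icap_download.py | _build_keys
-- ===== SOURCE A (Python) =====
-- import unicodedata
--
-- def _canonical_scheme_name(name: str | None) -> str:
--     if name is None:
--         return ""
--     collapsed = " ".join(str(name).split())
--     if collapsed == "":
--         return ""
--     collapsed = unicodedata.normalize("NFKD", collapsed).encode("ascii", "ignore").decode("ascii")
--
--     aliases = {
--         "European Union Emissions Trading System (until 2018)": "European Union Emissions Trading System",
--         "European Union Emissions Trading System (from 2019)": "European Union Emissions Trading System",
--         "European Union Emissions Trading System (from 2019, download)": "European Union Emissions Trading System",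
--         "New Zealand Emissions Trading System (Up to 2023)": "New Zealand Emissions Trading System",
--         "New Zealand Emissions Trading System (From 2024)": "New Zealand Emissions Trading System",
--         "California Cap-and-Trade Program (download)": "California Cap-and-Trade Program",
--         "Washington Cap-and-Invest Program (download)": "Washington Cap-and-Invest Program",
--         "United Kingdom Emissions Trading Scheme (download)": "United Kingdom Emissions Trading Scheme",
--     }
--     return aliases.get(collapsed, collapsed)
--
-- def _normalize_scheme_name(name: str | None) -> str:
--     if name is None:
--         return ""
--     if name == " ":
--         return " "
--     collapsed = " ".join(name.split())
--     if collapsed == "":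
--         return ""
--     return unicodedata.normalize("NFKD", collapsed).encode("ascii", "ignore").decode("ascii")
--
-- def _normalize_label(label: str | None) -> str:
--     if label is None:
--         return ""
--     if label == " ":
--         return " "
--     return label.strip()
--
-- def _build_keys(
--     header_top: list[str],
--     header: list[str],
--     canonicalize: bool = False,
-- ) -> list[tuple[str, str]]:
--     keys = []
--     current_scheme = ""
--     for top_value, label in zip(header_top, header):
--         top_value = top_value if top_value is not None else ""
--         if top_value != "":
--             current_scheme = top_value
--         scheme_name = _normalize_scheme_name(current_scheme)
--         if canonicalize:
--             scheme_name = _canonical_scheme_name(scheme_name)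
--         keys.append((scheme_name, _normalize_label(label)))
--     return keys
-- ===== SOURCE B (Python) =====
-- import unicodedata
--
--
-- def _canonical_scheme_name(name):
--     if name is None:
--         return ""
--     collapsed = " ".join(str(name).split())
--     if collapsed == "":
--         return ""
--     collapsed = unicodedata.normalize("NFKD", collapsed).encode("ascii", "ignore").decode("ascii")
--     aliases = {
--         "European Union Emissions Trading System (until 2018)": "European Union Emissions Trading System",
--         "European Union Emissions Trading System (from 2019)": "European Union Emissions Trading System",
--         "European Union Emissions Trading System (from 2019, download)": "European Union Emissions Trading System",
--         "New Zealand Emissions Trading System (Up to 2023)": "New Zealand Emissions Trading System",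
--         "New Zealand Emissions Trading System (From 2024)": "New Zealand Emissions Trading System",
--         "California Cap-and-Trade Program (download)": "California Cap-and-Trade Program",
--         "Washington Cap-and-Invest Program (download)": "Washington Cap-and-Invest Program",
--         "United Kingdom Emissions Trading Scheme (download)": "United Kingdom Emissions Trading Scheme",
--     }
--     return aliases.get(collapsed, collapsed)
--
--
-- def _normalize_scheme_name(name):
--     if name is None:
--         return ""
--     if name == " ":
--         return " "
--     collapsed = " ".join(name.split())
--     if collapsed == "":
--         return ""
--     return unicodedata.normalize("NFKD", collapsed).encode("ascii", "ignore").decode("ascii")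
--
--
-- def _normalize_label(label):
--     if label is None:
--         return ""
--     if label == " ":
--         return " "
--     return label.strip()
--
--
-- def _build_keys(header_top, header, canonicalize=False):
--     # Pass 1: forward-fill the scheme row (None -> "", empty inherits previous, start "").
--     resolved = []
--     current = ""
--     for value in header_top:
--         value = value if value is not None else ""
--         if value != "":
--             current = value
--         resolved.append(current)
--     # Pass 2: one normalization per DISTINCT scheme, memoized in a table.
--     table = {}
--     for scheme in resolved:
--         if scheme not in table:
--             name = _normalize_scheme_name(scheme)
--             if canonicalize:
--                 name = _canonical_scheme_name(name)
--             table[scheme] = name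
--     # Pass 3: zip the resolved schemes with the labels through the table.
--     return [(table.get(scheme, ""), _normalize_label(label))
--             for scheme, label in zip(resolved, header)]
-- ===== Notes on version B (the rewrite author's own statement) =====
-- stated objective: alternative
-- what changed: A's single stateful loop (forward-filling the scheme and normalizing it inline per column) is replaced by three passes: forward-fill the scheme row, build a memo table with one normalization per distinct scheme, then zip-map resolved schemes and labels through the table.
import Mathlib
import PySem

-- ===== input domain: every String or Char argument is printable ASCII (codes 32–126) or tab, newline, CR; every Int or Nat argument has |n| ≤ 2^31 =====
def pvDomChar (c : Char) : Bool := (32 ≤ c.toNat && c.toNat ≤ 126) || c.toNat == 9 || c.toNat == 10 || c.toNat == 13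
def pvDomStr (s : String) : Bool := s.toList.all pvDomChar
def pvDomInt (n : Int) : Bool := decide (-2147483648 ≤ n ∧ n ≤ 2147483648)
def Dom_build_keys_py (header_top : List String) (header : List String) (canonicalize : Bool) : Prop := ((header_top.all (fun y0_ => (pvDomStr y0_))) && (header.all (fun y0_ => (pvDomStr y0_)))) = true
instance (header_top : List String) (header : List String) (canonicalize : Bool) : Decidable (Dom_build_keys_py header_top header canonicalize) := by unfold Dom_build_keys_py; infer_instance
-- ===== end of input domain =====

-- B replaces A's single stateful loop by three passes (forward-fill, a memo table of
-- normalized names per distinct scheme, and a zip-map through the table): alternative decomposition.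

-- ===== PORT A =====
-- alias table of _canonical_scheme_name, as a dict literal
def pvAliases : PySem.Dict String String := PySem.Dict.ofList [
  ("European Union Emissions Trading System (until 2018)", "European Union Emissions Trading System"),
  ("European Union Emissions Trading System (from 2019)", "European Union Emissions Trading System"),
  ("European Union Emissions Trading System (from 2019, download)", "European Union Emissions Trading System"),
  ("New Zealand Emissions Trading System (Up to 2023)", "New Zealand Emissions Trading System"),
  ("New Zealand Emissions Trading System (From 2024)", "New Zealand Emissions Trading System"),
  ("California Cap-and-Trade Program (download)", "California Cap-and-Trade Program"),
  ("Washington Cap-and-Invest Program (download)", "Washington Cap-and-Invest Program"),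
  ("United Kingdom Emissions Trading Scheme (download)", "United Kingdom Emissions Trading Scheme")]

-- _canonical_scheme_name (name is a String here, never None).  On the ASCII domain the
-- NFKD-normalize/encode('ascii','ignore') step is the identity, so it is not re-applied.
def canonical_scheme_name (name : String) : String :=
  let collapsed := PySem.Str.join " " (PySem.Str.split₀ name)
  if collapsed = "" then ""
  else pvAliases.getD collapsed collapsed

-- _normalize_scheme_name (same remark about NFKD on the ASCII domain)
def normalize_scheme_name (name : String) : String :=
  if name = " " then " "
  else PySem.Str.join " " (PySem.Str.split₀ name)

-- _normalize_label
def normalize_label (label : String) : String :=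
  if label = " " then " " else PySem.Str.strip label

def build_keys_py (header_top : List String) (header : List String) (canonicalize : Bool) : List (String × String) :=
  ((header_top.zip header).foldl (fun (st : List (String × String) × String) p =>
      let current_scheme := if p.1 ≠ "" then p.1 else st.2
      let scheme_name := normalize_scheme_name current_scheme
      let scheme_name := if canonicalize then canonical_scheme_name scheme_name else scheme_name
      (st.1 ++ [(scheme_name, normalize_label p.2)], current_scheme))
    ([], "")).1

-- ===== PORT B =====
-- the normalized name assigned to one resolved scheme string
def pvName (canonicalize : Bool) (s : String) : String :=
  let n := normalize_scheme_name s
  if canonicalize then canonical_scheme_name n else n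

def build_keys_py_alt (header_top : List String) (header : List String) (canonicalize : Bool) : List (String × String) :=
  let resolved := (header_top.foldl (fun (st : List String × String) v =>
      let c := if v ≠ "" then v else st.2
      (st.1 ++ [c], c)) ([], "")).1
  let table := resolved.foldl (fun d s =>
      if d.contains s then d else d.insert s (pvName canonicalize s)) PySem.Dict.empty
  (resolved.zip header).map (fun p => (table.getD p.1 "", normalize_label p.2))

-- ===== PRECONDITION & SPEC =====
def Spec_build_keys_py (header_top : List String) (header : List String) (canonicalize : Bool) (out : List (String × String)) : Prop := out = build_keys_py_alt header_top header canonicalize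
instance (header_top : List String) (header : List String) (canonicalize : Bool) (out : List (String × String)) : Decidable (Spec_build_keys_py header_top header canonicalize out) := by unfold Spec_build_keys_py; infer_instance

-- ===== CLAIM (what is proved, stated in full; the proofs are below) =====
def Claim_equal_build_keys_py : Prop := ∀ (header_top : List String) (header : List String) (canonicalize : Bool), Dom_build_keys_py header_top header canonicalize → Spec_build_keys_py header_top header canonicalize (build_keys_py header_top header canonicalize)

-- ===== LEMMAS AND PROOFS =====

-- recursive form of the forward fill
def pvFill (cur : String) : List String → List String
  | [] => []
  | v :: rest =>
      let c := if v ≠ "" then v else cur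
      c :: pvFill c rest

theorem pvFill_foldl (ht : List String) (acc : List String) (cur : String) :
    (ht.foldl (fun (st : List String × String) v =>
        let c := if v ≠ "" then v else st.2
        (st.1 ++ [c], c)) (acc, cur)) = (acc ++ pvFill cur ht, (pvFill cur ht).getLastD cur) := by
  induction ht generalizing acc cur with
  | nil => simp [pvFill]
  | cons v rest ih =>
      simp only [List.foldl_cons, pvFill]
      rw [ih]
      simp [List.append_assoc, -List.getLastD_eq_getLast?, List.getLastD_cons]

theorem pvFill_foldl_fst (ht : List String) (cur : String) :
    (ht.foldl (fun (st : List String × String) v =>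
        let c := if v ≠ "" then v else st.2
        (st.1 ++ [c], c)) ([], cur)).1 = pvFill cur ht := by
  rw [pvFill_foldl]; simp

-- recursive form of A's loop
def pvGoA (canonicalize : Bool) (cur : String) : List (String × String) → List (String × String)
  | [] => []
  | p :: rest =>
      let c := if p.1 ≠ "" then p.1 else cur
      (pvName canonicalize c, normalize_label p.2) :: pvGoA canonicalize c rest

theorem pvGoA_foldl (canonicalize : Bool) (l : List (String × String))
    (acc : List (String × String)) (cur : String) :
    (l.foldl (fun (st : List (String × String) × String) p =>
        let current_scheme := if p.1 ≠ "" then p.1 else st.2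
        let scheme_name := normalize_scheme_name current_scheme
        let scheme_name := if canonicalize then canonical_scheme_name scheme_name else scheme_name
        (st.1 ++ [(scheme_name, normalize_label p.2)], current_scheme)) (acc, cur)).1
      = acc ++ pvGoA canonicalize cur l := by
  induction l generalizing acc cur with
  | nil => simp [pvGoA]
  | cons p rest ih =>
      simp only [List.foldl_cons, pvGoA]
      rw [ih]
      simp [pvName, List.append_assoc]

-- A's loop is the zip of the forward-filled scheme row with the labels, mapped through pvName
theorem pvGoA_eq_map (canonicalize : Bool) (ht h : List String) (cur : String) :
    pvGoA canonicalize cur (ht.zip h)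
      = ((pvFill cur ht).zip h).map (fun p => (pvName canonicalize p.1, normalize_label p.2)) := by
  induction ht generalizing cur h with
  | nil => simp [pvGoA, pvFill]
  | cons v rest ih =>
      cases h with
      | nil => simp [pvGoA, pvFill]
      | cons lab h' => simp [pvGoA, pvFill, ih]

-- table invariant: every stored value is pvName of its key, and every scheme that
-- occurred in the list is stored
theorem pvTable_get? (F : String → String) (L : List String) (d : PySem.Dict String String)
    (hinv : ∀ j, d.get? j = none ∨ d.get? j = some (F j)) (k : String)
    (hk : k ∈ L ∨ d.get? k = some (F k)) :
    (L.foldl (fun d s => if d.contains s then d else d.insert s (F s)) d).get? k = some (F k) := by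
  induction L generalizing d with
  | nil =>
      rcases hk with hk | hk
      · simp at hk
      · simpa using hk
  | cons s rest ih =>
      simp only [List.foldl_cons]
      set d' := if d.contains s then d else d.insert s (F s) with hd'
      have hinv' : ∀ j, d'.get? j = none ∨ d'.get? j = some (F j) := by
        intro j
        rw [hd']
        split_ifs with hc
        · exact hinv j
        · rw [PySem.Dict.get?_insert]
          split_ifs with hj
          · subst hj; exact Or.inr rfl
          · exact hinv j
      apply ih d' hinv'
      rcases hk with hk | hk
      · rcases List.mem_cons.mp hk with hk | hk
        · subst hk
          right
          rw [hd']
          split_ifs with hc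
          · have := hinv k
            rcases this with hnone | hsome
            · rw [PySem.Dict.contains_eq_isSome_get?, hnone] at hc; simp at hc
            · exact hsome
          · exact PySem.Dict.get?_insert_self d k (F k)
        · exact Or.inl hk
      · right
        rw [hd']
        split_ifs with hc
        · exact hk
        · rw [PySem.Dict.get?_insert]
          split_ifs with hj
          · subst hj; rfl
          · exact hk

-- ===== VERDICT (by name: the statement is the Claim_ definition above) =====
theorem build_keys_py_spec : Claim_equal_build_keys_py := by
  intro ht h canonicalize _
  unfold Spec_build_keys_py build_keys_py build_keys_py_alt
  rw [pvGoA_foldl, pvFill_foldl_fst]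
  simp only [List.nil_append]
  rw [pvGoA_eq_map]
  apply List.map_congr_left
  intro p hp
  obtain ⟨a, b⟩ := p
  have hmem : a ∈ pvFill "" ht := (List.of_mem_zip hp).1
  have := pvTable_get? (pvName canonicalize) (pvFill "" ht) PySem.Dict.empty
    (by intro j; left; exact PySem.Dict.get?_empty j) a (Or.inl hmem)
  rw [PySem.Dict.getD_eq_get?_getD, this]
  simp
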